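-- pv_equiv track=rewrite | github.com/grasshopperTrainer/coding_practice | baekjoon/accepted/11286 절대값 힙.py | solution
-- ===== SOURCE A (Python) =====
-- def solution(N, nums):
--     def _val(heap, idx):
--         return heap[idx -1]
--
--     def _swap(heap, idx1, idx2):
--         heap[idx1-1], heap[idx2-1] = heap[idx2-1], heap[idx1-1]
--
--     def push(heap, v):
--         heap.append((abs(v), v))
--         idx = len(heap)
--         while idx > 1:
--             current_abs, current_v = _val(heap, idx)
--             upper_abs, upper_v = _val(heap, idx//2)
--             if upper_abs > current_abs or (upper_abs == current_abs and upper_v > current_v):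
--                 _swap(heap, idx//2, idx)
--                 idx = idx//2
--             else:
--                 break
--
--     def pop(heap):
--         if len(heap) == 0:
--             raise
--         elif len(heap) == 1:
--             return heap.pop()[1]
--
--         top, heap[0] = heap[0][1], heap.pop()
--         idx = 1
--         while True:
--             children = []
--             left_idx, right_idx = idx*2, idx*2+1
--             if left_idx <= len(heap):
--                 children.append((_val(heap, left_idx), left_idx))
--             if right_idx <= len(heap):
--                 children.append((_val(heap, right_idx), right_idx))
--
--             if not children:
--                 break
--
--             if len(children) == 2 and children[0][0][0] == children[1][0][0]:
--                 (lower_abs, lower_v), lower_idx = sorted(children, key=lambda x: x[0][1])[0]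
--             else:
--                 (lower_abs, lower_v), lower_idx = sorted(children, key=lambda x: x[0][0])[0]
--             current_abs, current_v = _val(heap, idx)
--             if lower_abs < current_abs or (lower_abs == current_abs and lower_v < current_v):
--                 _swap(heap, lower_idx, idx)
--                 idx = lower_idx
--             else:
--                 break
--         return top
--
--     heap = []
--     answer = []
--     for n in nums:
--         if n == 0:
--             if not heap:
--                 answer.append(0)
--             else:
--                 answer.append(pop(heap))
--         else:
--             push(heap, n)
--     return answer
-- ===== SOURCE B (Python) =====
-- def solution(N, nums):
--     # Sorted-list priority queue: 'heap' is kept ascending by (abs(n), n);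
--     # the front element is always the minimum, so pop is just heap.pop(0).
--     heap = []
--     answer = []
--     for n in nums:
--         if n == 0:
--             if heap:
--                 answer.append(heap.pop(0)[1])
--             else:
--                 answer.append(0)
--         else:
--             key = (abs(n), n)
--             lo, hi = 0, len(heap)
--             while lo < hi:
--                 mid = (lo + hi) // 2
--                 if key < heap[mid]:
--                     hi = mid
--                 else:
--                     lo = mid + 1
--             heap.insert(lo, key)
--     return answer
-- ===== Notes on version B (the rewrite author's own statement) =====
-- stated objective: alternative
-- what changed: A's hand-written 1-based binary heap with sift-up/sift-down index loops is replaced by a single list kept sorted ascending by (abs(n), n): a push binary-searches the insertion point and inserts there, a pop just removes the front element, which is always the minimum.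
import Mathlib
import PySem

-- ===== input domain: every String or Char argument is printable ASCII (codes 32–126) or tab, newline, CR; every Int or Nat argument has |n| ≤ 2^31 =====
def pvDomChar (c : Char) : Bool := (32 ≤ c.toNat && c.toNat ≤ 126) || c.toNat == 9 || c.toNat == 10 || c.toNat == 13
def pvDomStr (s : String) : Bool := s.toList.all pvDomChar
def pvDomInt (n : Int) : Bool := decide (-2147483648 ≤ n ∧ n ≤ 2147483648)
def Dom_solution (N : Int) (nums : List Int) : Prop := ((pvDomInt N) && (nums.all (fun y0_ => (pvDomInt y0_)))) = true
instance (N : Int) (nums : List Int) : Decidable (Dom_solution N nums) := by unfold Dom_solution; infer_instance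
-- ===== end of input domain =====

-- B replaces A's hand-written binary heap (sift-up/sift-down) by a list kept sorted by (abs n, n):
-- alternative data structure, same return value; neither version mutates its arguments' observable state.

-- ===== PORT A =====
-- heap[idx-1]  (1-based access as in A's _val; every call is in range, so getD is exact)
def pvVal (heap : List (Int × Int)) (idx : Nat) : Int × Int := heap.getD (idx - 1) (0, 0)

-- A's _swap (simultaneous assignment: both right-hand values are read first)
def pvSwap (heap : List (Int × Int)) (i j : Nat) : List (Int × Int) :=
  (heap.set (i - 1) (pvVal heap j)).set (j - 1) (pvVal heap i)

-- the `while idx > 1` loop of A's push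
def pvSiftUp (heap : List (Int × Int)) (idx : Nat) : List (Int × Int) :=
  if 1 < idx then
    let cur := pvVal heap idx
    let up := pvVal heap (idx / 2)
    if up.1 > cur.1 ∨ (up.1 = cur.1 ∧ up.2 > cur.2) then
      pvSiftUp (pvSwap heap (idx / 2) idx) (idx / 2)
    else heap
  else heap
termination_by idx
decreasing_by omega

def pvPush (heap : List (Int × Int)) (v : Int) : List (Int × Int) :=
  pvSiftUp (heap ++ [(|v|, v)]) (heap.length + 1)

-- the `children` list built in A's pop
def pvChildren (heap : List (Int × Int)) (idx : Nat) : List ((Int × Int) × Nat) :=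
  (if idx * 2 ≤ heap.length then [(pvVal heap (idx * 2), idx * 2)] else []) ++
  (if idx * 2 + 1 ≤ heap.length then [(pvVal heap (idx * 2 + 1), idx * 2 + 1)] else [])

-- sorted(children, key=...)[0]  (children is non-empty whenever this is evaluated, so headD is exact)
def pvLower (children : List ((Int × Int) × Nat)) : (Int × Int) × Nat :=
  if children.length = 2 ∧ (children.getD 0 ((0, 0), 0)).1.1 = (children.getD 1 ((0, 0), 0)).1.1 then
    (PySem.List.sorted children (fun x => x.1.2) false).headD ((0, 0), 0)
  else
    (PySem.List.sorted children (fun x => x.1.1) false).headD ((0, 0), 0)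

-- the `while True` loop of A's pop; fuel = heap length is always enough (idx grows every round)
def pvSiftDown (fuel : Nat) (heap : List (Int × Int)) (idx : Nat) : List (Int × Int) :=
  match fuel with
  | 0 => heap
  | fuel + 1 =>
    let children := pvChildren heap idx
    if children = [] then heap
    else
      let lw := pvLower children
      let cur := pvVal heap idx
      if lw.1.1 < cur.1 ∨ (lw.1.1 = cur.1 ∧ lw.1.2 < cur.2) then
        pvSiftDown fuel (pvSwap heap lw.2 idx) lw.2
      else heap

def pvPop (heap : List (Int × Int)) : Int × List (Int × Int) :=
  if heap.length = 0 then (0, heap)      -- Python raises here; unreachable: solution guards with `if not heap`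
  else if heap.length = 1 then ((heap.getD 0 (0, 0)).2, heap.dropLast)
  else
    let top := (heap.getD 0 (0, 0)).2
    let last := heap.getD (heap.length - 1) (0, 0)
    let h := heap.dropLast.set 0 last
    (top, pvSiftDown h.length h 1)

def pvStepA (st : List (Int × Int) × List Int) (n : Int) : List (Int × Int) × List Int :=
  if n = 0 then
    if st.1 = [] then (st.1, st.2 ++ [0])
    else
      let r := pvPop st.1
      (r.2, st.2 ++ [r.1])
  else (pvPush st.1 n, st.2)

def solution (N : Int) (nums : List Int) : List Int :=
  (nums.foldl pvStepA ([], [])).2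

-- ===== PORT B =====
-- B's binary search `while lo < hi: ...` (tuple < is lexicographic; heap[mid] is in range)
def pvInsPos (heap : List (Int × Int)) (key : Int × Int) (lo hi : Nat) : Nat :=
  if lo < hi then
    let mid := (lo + hi) / 2
    if key.1 < (heap.getD mid (0, 0)).1 ∨
        (key.1 = (heap.getD mid (0, 0)).1 ∧ key.2 < (heap.getD mid (0, 0)).2) then
      pvInsPos heap key lo mid
    else pvInsPos heap key (mid + 1) hi
  else lo
termination_by hi - lo
decreasing_by all_goals omega

def pvStepB (st : List (Int × Int) × List Int) (n : Int) : List (Int × Int) × List Int :=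
  if n = 0 then
    match st.1 with
    | [] => ([], st.2 ++ [0])
    | x :: rest => (rest, st.2 ++ [x.2])          -- heap.pop(0)[1]
  else
    let key := (|n|, n)
    (st.1.insertIdx (pvInsPos st.1 key 0 st.1.length) key, st.2)

def solution_alt (N : Int) (nums : List Int) : List Int :=
  (nums.foldl pvStepB ([], [])).2

-- ===== PRECONDITION & SPEC =====
def Spec_solution (N : Int) (nums : List Int) (out : List Int) : Prop := out = solution_alt N nums
instance (N : Int) (nums : List Int) (out : List Int) : Decidable (Spec_solution N nums out) := by unfold Spec_solution; infer_instance

-- ===== CLAIM (what is proved, stated in full; the proofs are below) =====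
def Claim_equal_solution : Prop := ∀ (N : Int) (nums : List Int), Dom_solution N nums → Spec_solution N nums (solution N nums)

-- ===== LEMMAS AND PROOFS =====

-- lexicographic order on the stored pairs (abs v, v)
def LexLe (p q : Int × Int) : Prop := p.1 < q.1 ∨ (p.1 = q.1 ∧ p.2 ≤ q.2)
def LexLt (p q : Int × Int) : Prop := p.1 < q.1 ∨ (p.1 = q.1 ∧ p.2 < q.2)

theorem lexLe_refl (p : Int × Int) : LexLe p p := by unfold LexLe; omega

theorem lexLe_trans {p q r : Int × Int} (h1 : LexLe p q) (h2 : LexLe q r) : LexLe p r := by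
  unfold LexLe at *; omega

theorem lexLe_antisymm {p q : Int × Int} (h1 : LexLe p q) (h2 : LexLe q p) : p = q := by
  unfold LexLe at *
  have h3 : p.1 = q.1 ∧ p.2 = q.2 := by omega
  exact Prod.ext h3.1 h3.2

theorem lexLt_le {p q : Int × Int} (h : LexLt p q) : LexLe p q := by unfold LexLt LexLe at *; omega

theorem lexLe_of_not_lt {p q : Int × Int} (h : ¬ LexLt p q) : LexLe q p := by
  unfold LexLt at h; unfold LexLe; omega

theorem lexLt_of_not_le {p q : Int × Int} (h : ¬ LexLe p q) : LexLt q p := by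
  unfold LexLe at h; unfold LexLt; omega

theorem lexLe_of_lt_of_le {p q r : Int × Int} (h1 : LexLt p q) (h2 : LexLe q r) : LexLe p r := by
  unfold LexLt at h1; unfold LexLe at *; omega

-- 1-based heap property, exactly the invariant of A's array heap
def IsHeap (h : List (Int × Int)) : Prop :=
  ∀ i, 2 ≤ i → i ≤ h.length → LexLe (pvVal h (i / 2)) (pvVal h i)

-- partial heap invariants for sift-up
def UpP1 (h : List (Int × Int)) (idx : Nat) : Prop :=
  ∀ i, 2 ≤ i → i ≤ h.length → i ≠ idx → LexLe (pvVal h (i / 2)) (pvVal h i)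
def UpP2 (h : List (Int × Int)) (idx : Nat) : Prop :=
  2 ≤ idx → ∀ i, 2 ≤ i → i ≤ h.length → i / 2 = idx → LexLe (pvVal h (idx / 2)) (pvVal h i)

-- partial heap invariants for sift-down
def DnP1 (h : List (Int × Int)) (idx : Nat) : Prop :=
  ∀ i, 2 ≤ i → i ≤ h.length → i / 2 ≠ idx → LexLe (pvVal h (i / 2)) (pvVal h i)
def DnP2 (h : List (Int × Int)) (idx : Nat) : Prop :=
  2 ≤ idx → ∀ i, 2 ≤ i → i ≤ h.length → i / 2 = idx → LexLe (pvVal h (idx / 2)) (pvVal h i)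

theorem pvVal_eq_getElem (h : List (Int × Int)) (k : Nat) (h1 : 1 ≤ k) (h2 : k ≤ h.length) :
    pvVal h k = h[k - 1]'(by omega) := by
  unfold pvVal
  rw [List.getD_eq_getElem?_getD, List.getElem?_eq_getElem (by omega)]
  rfl

theorem swap_perm_aux {α : Type} (d : α) :
    ∀ (l : List α) (a b : Nat), a < l.length → b < l.length →
      ((l.set a (l.getD b d)).set b (l.getD a d)).Perm l
  | [], a, b, ha, hb => by simp at ha
  | x :: t, 0, 0, _, _ => by simp
  | x :: t, 0, b+1, ha, hb => by
      have hb' : b < t.length := by simpa using hb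
      simp only [List.getD_eq_getElem?_getD, List.getElem?_cons_succ, List.getElem?_cons_zero,
        List.set_cons_zero, List.set_cons_succ, List.getElem?_eq_getElem hb', Option.getD_some]
      exact (((List.set_perm_cons_eraseIdx hb' x).cons _).trans (List.Perm.swap _ _ _)).trans
        ((List.getElem_cons_eraseIdx_perm hb').cons x)
  | x :: t, a+1, 0, ha, hb => by
      have ha' : a < t.length := by simpa using ha
      simp only [List.getD_eq_getElem?_getD, List.getElem?_cons_succ, List.getElem?_cons_zero,
        List.set_cons_zero, List.set_cons_succ, List.getElem?_eq_getElem ha', Option.getD_some]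
      exact (((List.set_perm_cons_eraseIdx ha' x).cons _).trans (List.Perm.swap _ _ _)).trans
        ((List.getElem_cons_eraseIdx_perm ha').cons x)
  | x :: t, a+1, b+1, ha, hb => by
      have := swap_perm_aux d t a b (by simpa using ha) (by simpa using hb)
      simpa using this.cons x

theorem pvSwap_perm (h : List (Int × Int)) (i j : Nat)
    (hi1 : 1 ≤ i) (hi : i ≤ h.length) (hj1 : 1 ≤ j) (hj : j ≤ h.length) :
    (pvSwap h i j).Perm h := by
  unfold pvSwap pvVal
  exact swap_perm_aux _ h (i - 1) (j - 1) (by omega) (by omega)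

theorem pvSwap_length (h : List (Int × Int)) (i j : Nat) :
    (pvSwap h i j).length = h.length := by
  unfold pvSwap; simp

theorem pvVal_swap (h : List (Int × Int)) (i j k : Nat)
    (hi1 : 1 ≤ i) (hi : i ≤ h.length) (hj1 : 1 ≤ j) (hj : j ≤ h.length) (hk1 : 1 ≤ k) :
    pvVal (pvSwap h i j) k =
      if k = j then pvVal h i else if k = i then pvVal h j else pvVal h k := by
  unfold pvSwap pvVal
  simp only [List.getD_eq_getElem?_getD, List.getElem?_set, List.length_set]
  split_ifs <;> simp_all <;> omega

-- sift-up establishes the heap property and permutes nothing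
theorem pvSiftUp_spec (idx : Nat) :
    ∀ (h : List (Int × Int)), 1 ≤ idx → idx ≤ h.length → UpP1 h idx → UpP2 h idx →
      (pvSiftUp h idx).Perm h ∧ IsHeap (pvSiftUp h idx) := by
  induction idx using Nat.strong_induction_on with
  | _ idx ih =>
    intro h h1 hlen hp1 hp2
    rw [pvSiftUp]
    by_cases hgt : 1 < idx
    · rw [if_pos hgt]
      by_cases hcmp : (pvVal h (idx / 2)).1 > (pvVal h idx).1 ∨
          ((pvVal h (idx / 2)).1 = (pvVal h idx).1 ∧ (pvVal h (idx / 2)).2 > (pvVal h idx).2)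
      · simp only [if_pos hcmp]
        have hlt : LexLt (pvVal h idx) (pvVal h (idx / 2)) := by
          unfold LexLt; omega
        have hv := fun k hk1 => pvVal_swap h (idx / 2) idx k (by omega) (by omega) (by omega) hlen hk1
        have hlen' : (pvSwap h (idx / 2) idx).length = h.length := pvSwap_length h (idx / 2) idx
        have hup1 : UpP1 (pvSwap h (idx / 2) idx) (idx / 2) := by
          intro i hi2 hilen hne
          rw [hlen'] at hilen
          rw [hv i (by omega), hv (i / 2) (by omega)]
          by_cases hieq : i = idx
          · have e1 : ¬ (i / 2 = idx) := by omega
            have e2 : i / 2 = idx / 2 := by omega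
            simp only [if_neg e1, if_pos e2, if_pos hieq]
            exact lexLt_le hlt
          · by_cases hch : i / 2 = idx
            · have e3 : ¬ (i = idx / 2) := by omega
              simp only [if_pos hch, if_neg hieq, if_neg e3]
              exact hp2 (by omega) i hi2 hilen hch
            · by_cases hsib : i / 2 = idx / 2
              · simp only [if_neg hch, if_pos hsib, if_neg hieq, if_neg hne]
                have hbase := hp1 i hi2 hilen hieq
                rw [hsib] at hbase
                exact lexLe_of_lt_of_le hlt hbase
              · simp only [if_neg hch, if_neg hsib, if_neg hieq, if_neg hne]
                exact hp1 i hi2 hilen hieq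
        have hup2 : UpP2 (pvSwap h (idx / 2) idx) (idx / 2) := by
          intro hq i hi2 hilen hieq
          rw [hlen'] at hilen
          rw [hv i (by omega), hv (idx / 2 / 2) (by omega)]
          have e1 : ¬ (idx / 2 / 2 = idx) := by omega
          have e2 : ¬ (idx / 2 / 2 = idx / 2) := by omega
          simp only [if_neg e1, if_neg e2]
          have hpar : LexLe (pvVal h (idx / 2 / 2)) (pvVal h (idx / 2)) :=
            hp1 (idx / 2) (by omega) (by omega) (by omega)
          by_cases hii : i = idx
          · simp only [if_pos hii]
            exact hpar
          · have hn2 : ¬ (i = idx / 2) := by omega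
            simp only [if_neg hii, if_neg hn2]
            have hbase := hp1 i hi2 hilen hii
            rw [hieq] at hbase
            exact lexLe_trans hpar hbase
        obtain ⟨hperm, hheap⟩ := ih (idx / 2) (by omega) (pvSwap h (idx / 2) idx)
          (by omega) (by omega) hup1 hup2
        exact ⟨hperm.trans (pvSwap_perm h (idx / 2) idx (by omega) (by omega) (by omega) hlen),
          hheap⟩
      · simp only [if_neg hcmp]
        refine ⟨List.Perm.refl h, fun i hi2 hilen => ?_⟩
        by_cases hieq : i = idx
        · subst hieq; unfold LexLe; omega
        · exact hp1 i hi2 hilen hieq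
    · rw [if_neg hgt]
      refine ⟨List.Perm.refl h, fun i hi2 hilen => ?_⟩
      exact hp1 i hi2 hilen (by omega)

-- the selected child is a child and is lexicographically minimal among the children
theorem sorted_headD_min {α κ : Type} [LinearOrder κ] (cs : List α) (k : α → κ) (dflt : α)
    (hne : cs ≠ []) :
    (PySem.List.sorted cs k false).headD dflt ∈ cs ∧
      ∀ c ∈ cs, k ((PySem.List.sorted cs k false).headD dflt) ≤ k c := by
  cases heq : PySem.List.sorted cs k false with
  | nil => exact absurd ((PySem.List.sorted_eq_nil_iff _ _ _).1 heq) hne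
  | cons m t =>
    have hmem : m ∈ cs := by
      have : m ∈ PySem.List.sorted cs k false := by rw [heq]; exact List.mem_cons_self
      rwa [PySem.List.mem_sorted] at this
    exact ⟨by simpa using hmem, by simpa using PySem.List.key_head_sorted_le _ _ heq⟩

theorem uniq_abs_aux (cs : List ((Int × Int) × Nat)) (hlen : cs.length ≤ 2)
    (hd : cs.length = 2 → (cs.getD 0 ((0,0),0)).1.1 ≠ (cs.getD 1 ((0,0),0)).1.1)
    (m c : (Int × Int) × Nat) (hm : m ∈ cs) (hc : c ∈ cs) (heq : m.1.1 = c.1.1) : m = c := by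
  match cs, hlen with
  | [], _ => simp at hm
  | [c0], _ => simp_all
  | [c0, c1], _ =>
    have hd' := hd (by simp)
    simp only [List.getD_cons_zero, List.getD_cons_succ] at hd'
    rcases List.mem_cons.1 hm with rfl | hm' <;> rcases List.mem_cons.1 hc with rfl | hc' <;>
      simp_all

theorem pvChildren_len (h : List (Int × Int)) (idx : Nat) : (pvChildren h idx).length ≤ 2 := by
  unfold pvChildren; split <;> split <;> simp

theorem pvLower_spec (h : List (Int × Int)) (idx : Nat) (hne : pvChildren h idx ≠ []) :
    pvLower (pvChildren h idx) ∈ pvChildren h idx ∧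
      ∀ c ∈ pvChildren h idx, LexLe (pvLower (pvChildren h idx)).1 c.1 := by
  unfold pvLower
  split
  case isTrue hcond =>
    obtain ⟨hlen, habs⟩ := hcond
    obtain ⟨m1, hm1⟩ := sorted_headD_min (pvChildren h idx) (fun x => x.1.2) ((0,0),0) hne
    refine ⟨m1, fun c hc => ?_⟩
    have habs' : ∀ x ∈ pvChildren h idx, x.1.1 = ((pvChildren h idx).getD 0 ((0,0),0)).1.1 := by
      match hcs : pvChildren h idx, hlen with
      | [c0, c1], _ =>
        simp only [List.getD_cons_zero] at habs ⊢
        intro x hx; rcases List.mem_cons.1 hx with rfl | hx' <;> simp_all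
    have h1 := habs' _ m1
    have h2 := habs' _ hc
    exact Or.inr ⟨by omega, hm1 c hc⟩
  case isFalse hcond =>
    obtain ⟨m1, hm1⟩ := sorted_headD_min (pvChildren h idx) (fun x => x.1.1) ((0,0),0) hne
    refine ⟨m1, fun c hc => ?_⟩
    have hk := hm1 c hc
    by_cases hlt : ((PySem.List.sorted (pvChildren h idx) (fun x => x.1.1) false).headD ((0,0),0)).1.1 < c.1.1
    · exact Or.inl hlt
    · have heq1 : ((PySem.List.sorted (pvChildren h idx) (fun x => x.1.1) false).headD ((0,0),0)).1.1 = c.1.1 := by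
        simp only at hk hlt; omega
      have hd : (pvChildren h idx).length = 2 →
          ((pvChildren h idx).getD 0 ((0,0),0)).1.1 ≠ ((pvChildren h idx).getD 1 ((0,0),0)).1.1 := by
        intro h2; by_contra hcc; exact hcond ⟨h2, by omega⟩
      have := uniq_abs_aux (pvChildren h idx) (pvChildren_len h idx) hd _ c m1 hc heq1
      rw [this]
      exact Or.inr ⟨rfl, le_refl _⟩

theorem pvChildren_mem (h : List (Int × Int)) (idx : Nat) (c : (Int × Int) × Nat)
    (hc : c ∈ pvChildren h idx) :
    (c.2 = idx * 2 ∨ c.2 = idx * 2 + 1) ∧ c.2 ≤ h.length ∧ c.1 = pvVal h c.2 := by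
  unfold pvChildren at hc
  rcases List.mem_append.1 hc with hm | hm <;> [skip; skip] <;>
    · split at hm <;> simp_all

theorem pvChildren_eq_nil (h : List (Int × Int)) (idx : Nat) :
    pvChildren h idx = [] ↔ h.length < idx * 2 := by
  unfold pvChildren
  split <;> split <;> simp_all <;> omega

-- sift-down establishes the heap property and permutes nothing
theorem pvSiftDown_spec (fuel : Nat) :
    ∀ (h : List (Int × Int)) (idx : Nat), 1 ≤ idx → idx ≤ h.length →
      h.length + 1 - idx ≤ fuel → DnP1 h idx → DnP2 h idx →
      (pvSiftDown fuel h idx).Perm h ∧ IsHeap (pvSiftDown fuel h idx) := by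
  induction fuel with
  | zero =>
    intro h idx h1 hlen hfuel hp1 hp2
    exact absurd hfuel (by omega)
  | succ fuel ihf =>
    intro h idx h1 hlen hfuel hp1 hp2
    simp only [pvSiftDown]
    by_cases hch : pvChildren h idx = []
    · rw [if_pos hch]
      have hsmall : h.length < idx * 2 := (pvChildren_eq_nil h idx).1 hch
      refine ⟨List.Perm.refl h, fun i hi2 hilen => ?_⟩
      by_cases hpc : i / 2 = idx
      · omega
      · exact hp1 i hi2 hilen hpc
    · rw [if_neg hch]
      obtain ⟨hmem, hmin⟩ := pvLower_spec h idx hch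
      obtain ⟨hlw2, hlwlen, hlw1⟩ := pvChildren_mem h idx _ hmem
      have hmeml : idx * 2 ≤ h.length → (pvVal h (idx * 2), idx * 2) ∈ pvChildren h idx := by
        intro hle; unfold pvChildren; simp [hle]
      have hmemr : idx * 2 + 1 ≤ h.length → (pvVal h (idx * 2 + 1), idx * 2 + 1) ∈ pvChildren h idx := by
        intro hle; unfold pvChildren; simp [hle]
      have hchild_le : ∀ i, 2 ≤ i → i ≤ h.length → i / 2 = idx →
          LexLe (pvLower (pvChildren h idx)).1 (pvVal h i) := by
        intro i hi2 hilen hieq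
        have : i = idx * 2 ∨ i = idx * 2 + 1 := by omega
        rcases this with rfl | rfl
        · exact hmin _ (hmeml hilen)
        · exact hmin _ (hmemr hilen)
      by_cases hcmp : (pvLower (pvChildren h idx)).1.1 < (pvVal h idx).1 ∨
          ((pvLower (pvChildren h idx)).1.1 = (pvVal h idx).1 ∧
            (pvLower (pvChildren h idx)).1.2 < (pvVal h idx).2)
      · simp only [if_pos hcmp]
        have hlt : LexLt (pvLower (pvChildren h idx)).1 (pvVal h idx) := hcmp
        have hlwgt : idx < (pvLower (pvChildren h idx)).2 := by omega
        have hlw21 : 1 ≤ (pvLower (pvChildren h idx)).2 := by omega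
        have hv := fun k hk1 => pvVal_swap h (pvLower (pvChildren h idx)).2 idx k
          hlw21 hlwlen (by omega) hlen hk1
        have hlen' : (pvSwap h (pvLower (pvChildren h idx)).2 idx).length = h.length :=
          pvSwap_length _ _ _
        have hlwval : pvVal h (pvLower (pvChildren h idx)).2 = (pvLower (pvChildren h idx)).1 :=
          hlw1.symm
        have hdn1 : DnP1 (pvSwap h (pvLower (pvChildren h idx)).2 idx)
            (pvLower (pvChildren h idx)).2 := by
          intro i hi2 hilen hne
          rw [hlen'] at hilen
          rw [hv i (by omega), hv (i / 2) (by omega)]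
          by_cases hii : i = idx
          · have e1 : ¬ (i / 2 = idx) := by omega
            have e2 : ¬ (i / 2 = (pvLower (pvChildren h idx)).2) := by omega
            simp only [if_pos hii, if_neg e1, if_neg e2, hlwval]
            rw [hii, hlw1]
            exact hp2 (by omega) (pvLower (pvChildren h idx)).2 (by omega) hlwlen (by omega)
          · by_cases hil : i = (pvLower (pvChildren h idx)).2
            · have e1 : i / 2 = idx := by omega
              simp only [if_neg hii, if_pos hil, if_pos e1, hlwval]
              exact lexLt_le hlt
            · by_cases hpc : i / 2 = idx
              · have e2 : ¬ (i / 2 = (pvLower (pvChildren h idx)).2) := by omega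
                simp only [if_neg hii, if_neg hil, if_pos hpc, hlwval]
                exact hchild_le i hi2 hilen hpc
              · simp only [if_neg hii, if_neg hil, if_neg hpc, if_neg hne]
                exact hp1 i hi2 hilen hpc
        have hdn2 : DnP2 (pvSwap h (pvLower (pvChildren h idx)).2 idx)
            (pvLower (pvChildren h idx)).2 := by
          intro hq i hi2 hilen hieq
          rw [hlen'] at hilen
          have hpar : (pvLower (pvChildren h idx)).2 / 2 = idx := by omega
          rw [hv i (by omega), hv ((pvLower (pvChildren h idx)).2 / 2) (by omega)]
          have e1 : ¬ (i = idx) := by omega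
          have e2 : ¬ (i = (pvLower (pvChildren h idx)).2) := by omega
          rw [hpar]
          simp only [if_neg e1, if_neg e2, hlwval]
          have hbase := hp1 i hi2 hilen (by omega)
          rw [hieq, ← hlw1] at hbase
          exact hbase
        obtain ⟨hperm, hheap⟩ := ihf (pvSwap h (pvLower (pvChildren h idx)).2 idx)
          (pvLower (pvChildren h idx)).2 hlw21 (by omega) (by omega) hdn1 hdn2
        exact ⟨hperm.trans (pvSwap_perm h _ idx hlw21 hlwlen (by omega) hlen), hheap⟩
      · simp only [if_neg hcmp]
        refine ⟨List.Perm.refl h, fun i hi2 hilen => ?_⟩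
        by_cases hpc : i / 2 = idx
        · have hnotlt : ¬ LexLt (pvLower (pvChildren h idx)).1 (pvVal h idx) := hcmp
          have h2 := lexLe_of_not_lt hnotlt
          rw [hpc]
          exact lexLe_trans h2 (hchild_le i hi2 hilen hpc)
        · exact hp1 i hi2 hilen hpc

-- in a heap the root is lexicographically minimal
theorem isHeap_root_le (h : List (Int × Int)) (hh : IsHeap h) :
    ∀ i, 1 ≤ i → i ≤ h.length → LexLe (pvVal h 1) (pvVal h i) := by
  intro i
  induction i using Nat.strong_induction_on with
  | _ i ih =>
    intro h1 h2
    by_cases hi : i = 1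
    · subst hi; exact lexLe_refl _
    · exact lexLe_trans (ih (i / 2) (by omega) (by omega) (by omega)) (hh i (by omega) h2)

theorem isHeap_root_min (h : List (Int × Int)) (hh : IsHeap h) (x : Int × Int) (hx : x ∈ h) :
    LexLe (pvVal h 1) x := by
  obtain ⟨i, hi, rfl⟩ := List.mem_iff_getElem.1 hx
  have := isHeap_root_le h hh (i + 1) (by omega) (by omega)
  rwa [pvVal_eq_getElem h (i + 1) (by omega) (by omega)] at this

theorem lexLt_le_trans {p q r : Int × Int} (h1 : LexLt p q) (h2 : LexLe q r) : LexLt p r := by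
  unfold LexLt at *; unfold LexLe at h2; omega

theorem not_le_of_lexLt {p q : Int × Int} (h : LexLt p q) : ¬ LexLe q p := by
  unfold LexLt at h; unfold LexLe; omega

-- the binary search of B: everything left of the result is ≤ key, the stop element is > key
theorem pvInsPos_spec (s : List (Int × Int)) (key : Int × Int) (hs : s.Pairwise LexLe) :
    ∀ lo hi, lo ≤ hi → hi ≤ s.length →
      (∀ j, j < lo → LexLe (s.getD j (0, 0)) key) →
      (∀ j, hi ≤ j → j < s.length → LexLt key (s.getD j (0, 0))) →
      lo ≤ pvInsPos s key lo hi ∧ pvInsPos s key lo hi ≤ s.length ∧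
        (∀ j, j < pvInsPos s key lo hi → LexLe (s.getD j (0, 0)) key) ∧
        (pvInsPos s key lo hi < s.length →
          ¬ LexLe (s.getD (pvInsPos s key lo hi) (0, 0)) key) := by
  have hidx := List.pairwise_iff_getElem.1 hs
  have hgetD : ∀ (j : Nat) (hj : j < s.length), s.getD j (0,0) = s[j] := by
    intro j hj; rw [List.getD_eq_getElem?_getD, List.getElem?_eq_getElem hj]; rfl
  have hmono : ∀ a b, a ≤ b → b < s.length → LexLe (s.getD a (0,0)) (s.getD b (0,0)) := by
    intro a b hab hb
    rw [hgetD a (by omega), hgetD b hb]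
    by_cases hab' : a = b
    · subst hab'; exact lexLe_refl _
    · exact hidx a b (by omega) hb (by omega)
  intro lo hi
  fun_induction pvInsPos s key lo hi with
  | case1 lo hi hlt mid hcond ih =>
    intro hle hhi hleft hright
    have hmid : mid < s.length := by omega
    have hklt : LexLt key (s.getD mid (0, 0)) := hcond
    refine ih (by omega) (by omega) hleft ?_
    intro j hj1 hj2
    exact lexLt_le_trans hklt (hmono mid j (by omega) hj2)
  | case2 lo hi hlt mid hcond ih =>
    intro hle hhi hleft hright
    have hmid : mid < s.length := by omega
    have hkge : LexLe (s.getD mid (0, 0)) key := by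
      unfold LexLe; omega
    obtain ⟨a, b, c, d⟩ := ih (by omega) hhi
      (fun j hj => lexLe_trans (hmono j mid (by omega) hmid) hkge) hright
    exact ⟨by omega, b, c, d⟩
  | case3 lo hi hlt =>
    intro hle hhi hleft hright
    have hlohi : lo = hi := by omega
    refine ⟨le_refl _, by omega, hleft, fun hlen => ?_⟩
    exact not_le_of_lexLt (hright lo (by omega) hlen)

theorem insertIdx_eq_take_drop {α : Type} (key : α) :
    ∀ (p : Nat) (s : List α), p ≤ s.length → s.insertIdx p key = s.take p ++ key :: s.drop p
  | 0, s, _ => by simp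
  | p+1, [], h => by simp at h
  | p+1, x :: t, h => by
      simp only [List.insertIdx_succ_cons, List.take_succ_cons, List.drop_succ_cons,
        List.cons_append]
      rw [insertIdx_eq_take_drop key p t (by simpa using h)]

theorem insert_sorted (s : List (Int × Int)) (key : Int × Int) (hs : s.Pairwise LexLe) :
    (s.insertIdx (pvInsPos s key 0 s.length) key).Pairwise LexLe := by
  obtain ⟨-, hple, hleft, hstop⟩ := pvInsPos_spec s key hs 0 s.length (by omega) (le_refl _)
    (by omega) (by omega)
  set p := pvInsPos s key 0 s.length with hp
  have hidx := List.pairwise_iff_getElem.1 hs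
  have hgetD : ∀ (j : Nat) (hj : j < s.length), s.getD j (0,0) = s[j] := by
    intro j hj; rw [List.getD_eq_getElem?_getD, List.getElem?_eq_getElem hj]; rfl
  have hright : ∀ m (hm : m < s.length), p ≤ m → LexLe key s[m] := by
    intro m hm hpm
    have hplen : p < s.length := by omega
    have hp0 := lexLt_le (lexLt_of_not_le (hstop hplen))
    rw [hgetD p hplen] at hp0
    by_cases hmp : m = p
    · subst hmp; exact hp0
    · exact lexLe_trans hp0 (hidx p m (by omega) hm (by omega))
  rw [insertIdx_eq_take_drop key p s hple, List.pairwise_append]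
  refine ⟨hs.sublist (List.take_sublist p s), ?_, ?_⟩
  · rw [List.pairwise_cons]
    refine ⟨?_, hs.sublist (List.drop_sublist p s)⟩
    intro y hy
    obtain ⟨j, hj, rfl⟩ := List.mem_drop_iff_getElem.1 hy
    exact hright (p + j) (by omega) (by omega)
  · intro x hx y hy
    obtain ⟨j, hj, rfl⟩ := List.mem_take_iff_getElem.1 hx
    have hjp : j < p := by omega
    have hxkey : LexLe (s[j]'(by omega)) key := by
      have := hleft j hjp; rwa [hgetD j (by omega)] at this
    rcases List.mem_cons.1 hy with rfl | hy'
    · exact hxkey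
    · obtain ⟨m, hm, rfl⟩ := List.mem_drop_iff_getElem.1 hy'
      exact lexLe_trans hxkey (hright (p + m) (by omega) (by omega))

theorem insert_perm (s : List (Int × Int)) (key : Int × Int) (hs : s.Pairwise LexLe) :
    (s.insertIdx (pvInsPos s key 0 s.length) key).Perm (key :: s) := by
  have h := pvInsPos_spec s key hs 0 s.length (by omega) (le_refl _) (by omega) (by omega)
  exact List.perm_insertIdx key s h.2.1

-- the coupling invariant between A's heap and B's sorted list
def PQInv (h s : List (Int × Int)) : Prop := IsHeap h ∧ h.Perm s ∧ s.Pairwise LexLe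

theorem push_step (h s : List (Int × Int)) (v : Int) (hi : PQInv h s) :
    PQInv (pvPush h v) (s.insertIdx (pvInsPos s (|v|, v) 0 s.length) (|v|, v)) := by
  obtain ⟨hheap, hperm, hsort⟩ := hi
  unfold pvPush
  have hvapp : ∀ k, 1 ≤ k → k ≤ h.length → pvVal (h ++ [(|v|, v)]) k = pvVal h k := by
    intro k hk1 hk2
    unfold pvVal
    rw [List.getD_eq_getElem?_getD, List.getD_eq_getElem?_getD,
      List.getElem?_append_left (by omega)]
  have hup1 : UpP1 (h ++ [(|v|, v)]) (h.length + 1) := by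
    intro i hi2 hilen hne
    simp only [List.length_append, List.length_cons, List.length_nil] at hilen
    rw [hvapp i (by omega) (by omega), hvapp (i / 2) (by omega) (by omega)]
    exact hheap i hi2 (by omega)
  have hup2 : UpP2 (h ++ [(|v|, v)]) (h.length + 1) := by
    intro hq i hi2 hilen hieq
    simp only [List.length_append, List.length_cons, List.length_nil] at hilen
    omega
  obtain ⟨hperm', hheap'⟩ := pvSiftUp_spec (h.length + 1) (h ++ [(|v|, v)])
    (by omega) (by simp) hup1 hup2
  refine ⟨hheap', ?_, insert_sorted s (|v|, v) hsort⟩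
  exact (hperm'.trans ((List.perm_append_singleton _ _).trans (hperm.cons _))).trans
    (insert_perm s (|v|, v) hsort).symm

theorem pop_step (h s : List (Int × Int)) (hi : PQInv h s) (hne : h ≠ []) :
    ∃ hd tl, s = hd :: tl ∧ (pvPop h).1 = hd.2 ∧ PQInv (pvPop h).2 tl := by
  obtain ⟨hheap, hperm, hsort⟩ := hi
  obtain ⟨hd, tl, rfl⟩ : ∃ hd tl, s = hd :: tl := by
    cases hs : s with
    | nil => rw [hs] at hperm; exact absurd hperm.eq_nil hne
    | cons a t => exact ⟨a, t, rfl⟩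
  have hlen0 : h.length ≠ 0 := fun h0 => hne (List.length_eq_zero_iff.1 h0)
  have hroot : pvVal h 1 = hd := by
    have hrootmem : pvVal h 1 ∈ h := by
      have : pvVal h 1 = h[0]'(by omega) := pvVal_eq_getElem h 1 (by omega) (by omega)
      rw [this]; exact List.getElem_mem _
    have hrle : LexLe (pvVal h 1) hd :=
      isHeap_root_min h hheap hd (hperm.mem_iff.2 List.mem_cons_self)
    have hler : LexLe hd (pvVal h 1) := by
      rcases List.mem_cons.1 (hperm.subset hrootmem) with heq | hmem
      · rw [heq]; exact lexLe_refl _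
      · exact (List.pairwise_cons.1 hsort).1 _ hmem
    exact lexLe_antisymm hrle hler
  by_cases hl1 : h.length = 1
  · have hpop : pvPop h = ((h.getD 0 (0, 0)).2, h.dropLast) := by
      unfold pvPop
      rw [if_neg hlen0, if_pos hl1]
    obtain ⟨a, rfl⟩ : ∃ a, h = [a] := by
      match h, hl1 with
      | [a], _ => exact ⟨a, rfl⟩
    have hs1 : [a] = hd :: tl := List.singleton_perm.1 hperm
    injection hs1 with h1 h2
    subst h1
    rw [hpop, ← h2]
    refine ⟨a, [], rfl, ?_, ?_, List.Perm.refl [], List.Pairwise.nil⟩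
    · rfl
    · intro i hi2 hilen; simp at hilen; omega
  · have hlen2 : 2 ≤ h.length := by omega
    have hpop : pvPop h = ((h.getD 0 (0, 0)).2,
        pvSiftDown (h.dropLast.set 0 (h.getD (h.length - 1) (0, 0))).length
          (h.dropLast.set 0 (h.getD (h.length - 1) (0, 0))) 1) := by
      unfold pvPop
      rw [if_neg hlen0, if_neg hl1]
    have hdlne : h.dropLast ≠ [] := by
      have hx : h.dropLast.length = h.length - 1 := by simp
      intro hnil; rw [hnil] at hx; simp at hx; omega
    obtain ⟨d0, drest, hdl⟩ : ∃ a t, h.dropLast = a :: t := by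
      cases hc : h.dropLast with
      | nil => exact absurd hc hdlne
      | cons a t => exact ⟨a, t, rfl⟩
    obtain ⟨lst, hEq⟩ : ∃ l, h = (d0 :: drest) ++ [l] :=
      ⟨h.getLast hne, by rw [← hdl, List.dropLast_append_getLast hne]⟩
    have hlast : h.getD (h.length - 1) (0, 0) = lst := by
      rw [hEq]
      have hx : ((d0 :: drest) ++ [lst]).length - 1 = (d0 :: drest).length := by simp
      rw [hx, List.getD_eq_getElem?_getD, List.getElem?_concat_length]
      rfl
    have hg : h.dropLast.set 0 (h.getD (h.length - 1) (0, 0)) = lst :: drest := by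
      rw [hdl, hlast]; rfl
    rw [hpop, hg]
    have hdrlen : drest.length = h.length - 2 := by
      have hx : h.dropLast.length = h.length - 1 := by simp
      rw [hdl] at hx
      simp at hx; omega
    have hglen : (lst :: drest).length = h.length - 1 := by
      simp [hdrlen]; omega
    have hd0 : d0 = pvVal h 1 := by
      unfold pvVal
      rw [hEq]
      rfl
    have hvg : ∀ k, 2 ≤ k → k ≤ (lst :: drest).length →
        pvVal (lst :: drest) k = pvVal h k := by
      intro k hk2 hkl
      obtain ⟨k', rfl⟩ : ∃ k', k = k' + 2 := ⟨k - 2, by omega⟩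
      simp only [List.length_cons] at hkl
      unfold pvVal
      rw [hEq]
      show (lst :: drest).getD (k' + 2 - 1) (0, 0) =
        ((d0 :: drest) ++ [lst]).getD (k' + 2 - 1) (0, 0)
      have hx21 : k' + 2 - 1 = k' + 1 := by omega
      rw [hx21]
      rw [List.getD_eq_getElem?_getD, List.getD_eq_getElem?_getD, List.getElem?_cons_succ,
        List.cons_append, List.getElem?_cons_succ, List.getElem?_append_left (by omega)]
    have hdn1 : DnP1 (lst :: drest) 1 := by
      intro i hi2 hilen hne1
      rw [hvg i hi2 hilen, hvg (i / 2) (by omega) (by omega)]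
      rw [hglen] at hilen
      exact hheap i hi2 (by omega)
    have hdn2 : DnP2 (lst :: drest) 1 := fun hq => absurd hq (by omega)
    obtain ⟨hperm', hheap'⟩ := pvSiftDown_spec (lst :: drest).length
      (lst :: drest) 1 (by omega) (by simp) (by omega) hdn1 hdn2
    have hpermg : (lst :: drest).Perm tl := by
      have h1 : h.Perm (d0 :: (lst :: drest)) := by
        rw [hEq, List.cons_append]
        exact (List.perm_append_singleton _ _).cons d0
      have h2 : (d0 :: (lst :: drest)).Perm (hd :: tl) := h1.symm.trans hperm
      rw [hd0, hroot] at h2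
      exact h2.cons_inv
    refine ⟨hd, tl, rfl, ?_, hheap', hperm'.trans hpermg, (List.pairwise_cons.1 hsort).2⟩
    show (h.getD 0 (0, 0)).2 = hd.2
    have hx : h.getD 0 (0, 0) = pvVal h 1 := rfl
    rw [hx, hroot]

theorem fold_eq (nums : List Int) :
    ∀ (h s : List (Int × Int)) (ans : List Int), PQInv h s →
      (nums.foldl pvStepA (h, ans)).2 = (nums.foldl pvStepB (s, ans)).2 := by
  induction nums with
  | nil => intro h s ans _; rfl
  | cons n rest ih =>
    intro h s ans hi
    simp only [List.foldl_cons]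
    by_cases hn : n = 0
    · subst hn
      by_cases hh : h = []
      · have hs : s = [] := by
          have := hi.2.1; rw [hh] at this; exact this.nil_eq.symm
        subst hh; subst hs
        simp only [pvStepA, pvStepB]
        exact ih [] [] (ans ++ [0]) hi
      · obtain ⟨hd, tl, hseq, htop, hinv⟩ := pop_step h s hi hh
        have ha : pvStepA (h, ans) 0 = ((pvPop h).2, ans ++ [(pvPop h).1]) := by
          simp [pvStepA, hh]
        have hb : pvStepB (s, ans) 0 = (tl, ans ++ [hd.2]) := by
          simp [pvStepB, hseq]
        rw [ha, hb, htop]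
        exact ih _ _ _ hinv
    · have ha : pvStepA (h, ans) n = (pvPush h n, ans) := by simp [pvStepA, hn]
      have hb : pvStepB (s, ans) n =
          (s.insertIdx (pvInsPos s (|n|, n) 0 s.length) (|n|, n), ans) := by
        simp [pvStepB, hn]
      rw [ha, hb]
      exact ih _ _ _ (push_step h s n hi)

-- ===== VERDICT (by name: the statement is the Claim_ definition above) =====
theorem solution_spec : Claim_equal_solution := by
  intro N nums _
  unfold Spec_solution solution solution_alt
  exact fold_eq nums [] [] [] ⟨by intro i h1 h2; simp at h2; omega, List.Perm.refl [], List.Pairwise.nil⟩
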